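-- pv_equiv track=rewrite | github.com/lethihuyennga/hummm | tong26-39.py | question_32
-- ===== SOURCE A (Python) =====
-- def question_32(nums):
--     dsle=[]
--     dschan=[]
--     for num in nums:
--         if num%2==0:
--             dschan.append(num)
--         else:
--             dsle.append(num)
--     dschan.sort(reverse=True)
--     dsle.sort(reverse=False)
--     return dschan, dsle
-- ===== SOURCE B (Python) =====
-- def question_32(nums):
--     s = sorted(nums)
--     evens = [x for x in reversed(s) if x % 2 == 0]
--     odds = [x for x in s if x % 2 != 0]
--     return evens, odds
-- ===== Notes on version B (the rewrite author's own statement) =====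
-- stated objective: alternative
-- what changed: A partitions first and then sorts each group separately; B sorts the whole list once and derives the odds by a forward filtered pass and the evens by a backward filtered pass (sort-then-partition instead of partition-then-sort).
import Mathlib
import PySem

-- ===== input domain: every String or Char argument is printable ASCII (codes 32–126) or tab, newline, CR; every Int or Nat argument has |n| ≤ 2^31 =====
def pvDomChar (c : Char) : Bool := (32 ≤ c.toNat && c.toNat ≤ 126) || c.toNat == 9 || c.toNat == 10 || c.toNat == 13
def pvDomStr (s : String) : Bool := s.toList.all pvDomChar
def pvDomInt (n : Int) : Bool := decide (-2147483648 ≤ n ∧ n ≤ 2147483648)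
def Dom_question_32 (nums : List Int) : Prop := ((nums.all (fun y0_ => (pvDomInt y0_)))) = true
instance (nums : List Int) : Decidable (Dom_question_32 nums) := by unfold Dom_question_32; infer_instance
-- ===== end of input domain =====

-- B replaces A's partition-then-sort-twice by a single sort of the whole list followed by
-- a forward filtered pass (odds, ascending) and a backward filtered pass (evens, descending).

-- ===== PORT A =====
-- one loop appending each num to dschan (even) or dsle (odd); state = (dsle, dschan)
def question_32 (nums : List Int) : List Int × List Int :=
  let p := nums.foldl
    (fun (p : List Int × List Int) num =>
      if PySem.Int.mod num 2 == 0 then (p.1, p.2 ++ [num]) else (p.1 ++ [num], p.2))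
    ([], [])
  (PySem.List.sorted p.2 (fun x => x) true, PySem.List.sorted p.1 (fun x => x) false)

-- ===== PORT B =====
def question_32_alt (nums : List Int) : List Int × List Int :=
  let s := PySem.List.sorted nums (fun x => x) false
  (s.reverse.filter (fun x => PySem.Int.mod x 2 == 0),
   s.filter (fun x => !(PySem.Int.mod x 2 == 0)))

-- ===== PRECONDITION & SPEC =====
def Spec_question_32 (nums : List Int) (out : List Int × List Int) : Prop := out = question_32_alt nums
instance (nums : List Int) (out : List Int × List Int) : Decidable (Spec_question_32 nums out) := by unfold Spec_question_32; infer_instance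

-- ===== CLAIM (what is proved, stated in full; the proofs are below) =====
def Claim_equal_question_32 : Prop := ∀ (nums : List Int), Dom_question_32 nums → Spec_question_32 nums (question_32 nums)

-- ===== LEMMAS AND PROOFS =====

-- A's single-loop partition is a pair of filters
theorem question_32_fold_eq (nums : List Int) (a b : List Int) :
    nums.foldl
      (fun (p : List Int × List Int) num =>
        if PySem.Int.mod num 2 == 0 then (p.1, p.2 ++ [num]) else (p.1 ++ [num], p.2))
      (a, b)
    = (a ++ nums.filter (fun x => !(PySem.Int.mod x 2 == 0)),
       b ++ nums.filter (fun x => PySem.Int.mod x 2 == 0)) := by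
  induction nums generalizing a b with
  | nil => simp
  | cons n t ih =>
    cases h : PySem.Int.mod n 2 == 0 with
    | true =>
      simp only [List.foldl_cons, List.filter_cons, h, Bool.not_true, if_true,
        Bool.false_eq_true, if_false, ih]
      simp
    | false =>
      simp only [List.foldl_cons, List.filter_cons, h, Bool.not_false, if_true,
        Bool.false_eq_true, if_false, ih]
      simp

-- sorting a filtered list = filtering the sorted list (ascending)
theorem sorted_filter_asc (p : Int → Bool) (xs : List Int) :
    PySem.List.sorted (xs.filter p) (fun x => x) false
      = (PySem.List.sorted xs (fun x => x) false).filter p := by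
  refine List.Perm.eq_of_pairwise (le := (· ≤ · : Int → Int → Prop))
    (fun a b _ _ h1 h2 => le_antisymm h1 h2) ?_ ?_
    ((PySem.List.sorted_perm (xs.filter p) (fun x => x) false).trans
      (((PySem.List.sorted_perm xs (fun x => x) false).filter p).symm))
  · have := PySem.List.sorted_pairwise (xs := xs.filter p) (key := fun x => x)
    simpa using this
  · have := PySem.List.sorted_pairwise (xs := xs) (key := fun x => x)
    exact List.Pairwise.filter p (by simpa using this)

-- sorting a filtered list descending = reverse the ascending filtered sorted list
theorem sorted_filter_desc (p : Int → Bool) (xs : List Int) :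
    PySem.List.sorted (xs.filter p) (fun x => x) true
      = (PySem.List.sorted xs (fun x => x) false).reverse.filter p := by
  rw [List.filter_reverse, ← sorted_filter_asc p xs]
  refine List.Perm.eq_of_pairwise (le := fun a b : Int => b ≤ a)
    (fun a b _ _ h1 h2 => le_antisymm h2 h1) ?_ ?_
    (((PySem.List.sorted_perm (xs.filter p) (fun x => x) true).trans
      (PySem.List.sorted_perm (xs.filter p) (fun x => x) false).symm).trans
      (List.reverse_perm _).symm)
  · have := PySem.List.sorted_pairwise_rev (xs := xs.filter p) (key := fun x => x)
    simpa using this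
  · rw [List.pairwise_reverse]
    have := PySem.List.sorted_pairwise (xs := xs.filter p) (key := fun x => x)
    simpa using this

-- ===== VERDICT (by name: the statement is the Claim_ definition above) =====
theorem question_32_spec : Claim_equal_question_32 := by
  intro nums _
  show _ = _
  simp only [question_32, question_32_alt, question_32_fold_eq, List.nil_append]
  rw [sorted_filter_asc, sorted_filter_desc]
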